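-- pv_equiv track=rewrite | github.com/FuHehe12/Nitro-Engine | translate/scripts/split_md.py | find_enclosing_code_block
-- ===== SOURCE A (Python) =====
-- def find_enclosing_code_block(code_block_ranges: list[tuple[int, int]],
--                                line_idx: int) -> tuple[int, int] | None:
--     """找到包含指定行的代码块范围，返回 (start, end) 或 None。"""
--     if not code_block_ranges:
--         return None
--
--     lo, hi = 0, len(code_block_ranges) - 1
--     while lo <= hi:
--         mid = (lo + hi) // 2
--         start, end = code_block_ranges[mid]
--         if line_idx < start:
--             hi = mid - 1
--         elif line_idx > end:
--             lo = mid + 1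
--         else:
--             return start, end
--     return None
-- ===== SOURCE B (Python) =====
-- def find_enclosing_code_block(code_block_ranges: list[tuple[int, int]],
--                               line_idx: int) -> tuple[int, int] | None:
--     """Recursive divide-and-conquer on sublists instead of an index-bounded loop."""
--     def search(sub):
--         if not sub:
--             return None
--         mid = (len(sub) - 1) // 2
--         start, end = sub[mid]
--         if line_idx < start:
--             return search(sub[:mid])
--         elif line_idx > end:
--             return search(sub[mid + 1:])
--         else:
--             return (start, end)
--     return search(code_block_ranges)
-- ===== Notes on version B (the rewrite author's own statement) =====
-- stated objective: alternative
-- what changed: The index-pair iterative binary search is replaced by a recursive divide-and-conquer helper that recurses on sublists (slices) with no lo/hi indices, choosing the same pivot element so results match even on unsorted input.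
import Mathlib
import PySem

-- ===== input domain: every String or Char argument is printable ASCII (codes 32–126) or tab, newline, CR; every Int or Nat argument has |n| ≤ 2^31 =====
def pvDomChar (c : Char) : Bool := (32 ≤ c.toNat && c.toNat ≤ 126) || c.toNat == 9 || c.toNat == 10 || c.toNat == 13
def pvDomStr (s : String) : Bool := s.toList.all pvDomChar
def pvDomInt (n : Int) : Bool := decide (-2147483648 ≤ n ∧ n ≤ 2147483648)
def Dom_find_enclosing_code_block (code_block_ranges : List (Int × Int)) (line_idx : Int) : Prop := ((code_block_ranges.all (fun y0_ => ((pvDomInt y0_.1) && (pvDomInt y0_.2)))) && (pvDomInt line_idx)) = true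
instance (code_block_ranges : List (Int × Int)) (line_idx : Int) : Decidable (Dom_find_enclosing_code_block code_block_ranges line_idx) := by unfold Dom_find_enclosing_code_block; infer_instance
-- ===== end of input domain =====

-- B replaces the lo/hi-index iterative binary search by a recursive divide-and-conquer on sublists (objective: alternative decomposition, same results even on unsorted input).

-- ===== PORT A =====
-- literal port of A's while-loop as recursion over the loop state (lo, hi); fuel only guards totality (initial fuel = length suffices)
def findA_go (ranges : List (Int × Int)) (line : Int) : Nat → Int → Int → Option (Int × Int)
  | 0, _, _ => none
  | fuel + 1, lo, hi =>
    if lo ≤ hi then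
      match PySem.List.pyGet? ranges (PySem.Int.floordiv (lo + hi) 2) with
      | none => none
      | some (s, e) =>
        if line < s then findA_go ranges line fuel lo (PySem.Int.floordiv (lo + hi) 2 - 1)
        else if line > e then findA_go ranges line fuel (PySem.Int.floordiv (lo + hi) 2 + 1) hi
        else some (s, e)
    else none

def find_enclosing_code_block (code_block_ranges : List (Int × Int)) (line_idx : Int) : Option (Int × Int) :=
  if code_block_ranges = [] then none
  else findA_go code_block_ranges line_idx code_block_ranges.length 0 ((code_block_ranges.length : Int) - 1)

-- ===== PORT B =====
-- recursive divide-and-conquer over sublists (Source B's inner `search`); fuel only guards totality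
def searchB (line : Int) : Nat → List (Int × Int) → Option (Int × Int)
  | 0, _ => none
  | fuel + 1, l =>
    if h : l.length = 0 then none
    else
      let mid := (l.length - 1) / 2
      let p := l[mid]'(by omega)
      if line < p.1 then searchB line fuel (l.take mid)
      else if line > p.2 then searchB line fuel (l.drop (mid + 1))
      else some p

def find_enclosing_code_block_alt (code_block_ranges : List (Int × Int)) (line_idx : Int) : Option (Int × Int) :=
  searchB line_idx code_block_ranges.length code_block_ranges

-- ===== PRECONDITION & SPEC =====
def Spec_find_enclosing_code_block (code_block_ranges : List (Int × Int)) (line_idx : Int) (out : Option (Int × Int)) : Prop := out = find_enclosing_code_block_alt code_block_ranges line_idx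
instance (code_block_ranges : List (Int × Int)) (line_idx : Int) (out : Option (Int × Int)) : Decidable (Spec_find_enclosing_code_block code_block_ranges line_idx out) := by unfold Spec_find_enclosing_code_block; infer_instance

-- ===== CLAIM (what is proved, stated in full; the proofs are below) =====
def Claim_equal_find_enclosing_code_block : Prop := ∀ (code_block_ranges : List (Int × Int)) (line_idx : Int), Dom_find_enclosing_code_block code_block_ranges line_idx → Spec_find_enclosing_code_block code_block_ranges line_idx (find_enclosing_code_block code_block_ranges line_idx)

-- ===== LEMMAS AND PROOFS =====

lemma searchB_nil (line : Int) (fb : Nat) (l : List (Int × Int)) (hl : l.length = 0) :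
    searchB line fb l = none := by
  cases fb with
  | zero => rfl
  | succ f => rw [searchB, dif_pos hl]

lemma go_eq (ranges : List (Int × Int)) (line : Int) :
    ∀ fa fb (lo hi : Int), (hi + 1 - lo).toNat ≤ fa → 0 ≤ lo → hi < (ranges.length : Int) →
      ((ranges.drop lo.toNat).take (hi + 1 - lo).toNat).length ≤ fb →
      findA_go ranges line fa lo hi =
        searchB line fb ((ranges.drop lo.toNat).take (hi + 1 - lo).toNat) := by
  intro fa
  induction fa with
  | zero =>
    intro fb lo hi ha hlo hhi hb
    rw [findA_go, searchB_nil line fb _ (by simp only [List.length_take, List.length_drop]; omega)]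
  | succ fa IH =>
    intro fb lo hi ha hlo hhi hb
    have hN : ((ranges.drop lo.toNat).take (hi + 1 - lo).toNat).length = (hi + 1 - lo).toNat := by
      simp only [List.length_take, List.length_drop]
      omega
    by_cases h : lo ≤ hi
    · have hfd : PySem.Int.floordiv (lo + hi) 2 = (lo + hi) / 2 :=
        PySem.Int.floordiv_eq_ediv_of_pos (by norm_num)
      have hmb : lo ≤ (lo + hi) / 2 ∧ (lo + hi) / 2 ≤ hi := by
        have := PySem.Int.floordiv_two_mid_bounds h
        rwa [hfd] at this
      have hget0 : PySem.List.pyGet? ranges ((lo + hi) / 2) =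
          some (ranges[((lo + hi) / 2).toNat]'(by omega)) :=
        PySem.List.pyGet?_eq_some_getElem ranges (by omega) (by omega)
      rcases hq : ranges[((lo + hi) / 2).toNat]'(by omega) with ⟨s, e⟩
      have hget : PySem.List.pyGet? ranges ((lo + hi) / 2) = some (s, e) := by
        rw [hget0, hq]
      cases fb with
      | zero => omega
      | succ fb =>
        have hidx : (((ranges.drop lo.toNat).take (hi + 1 - lo).toNat).length - 1) / 2
            = ((lo + hi) / 2 - lo).toNat := by
          rw [hN]; omega
        have hmidlt : (((ranges.drop lo.toNat).take (hi + 1 - lo).toNat).length - 1) / 2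
            < ((ranges.drop lo.toNat).take (hi + 1 - lo).toNat).length := by
          omega
        have helt : ((ranges.drop lo.toNat).take (hi + 1 - lo).toNat)[
              (((ranges.drop lo.toNat).take (hi + 1 - lo).toNat).length - 1) / 2]'hmidlt
            = (s, e) := by
          simp only [hidx, List.getElem_take, List.getElem_drop]
          have hix : lo.toNat + ((lo + hi) / 2 - lo).toNat = ((lo + hi) / 2).toNat := by omega
          simp only [hix]
          exact hq
        rw [findA_go, if_pos h, hfd, hget]
        rw [searchB, dif_neg (by omega)]
        simp only [helt]
        by_cases h1 : line < s
        · rw [if_pos h1, if_pos h1]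
          have hlist : ((ranges.drop lo.toNat).take (hi + 1 - lo).toNat).take
              ((((ranges.drop lo.toNat).take (hi + 1 - lo).toNat).length - 1) / 2)
              = (ranges.drop lo.toNat).take ((lo + hi) / 2 - 1 + 1 - lo).toNat := by
            rw [List.take_take, hidx]
            congr 1
            omega
          rw [hlist]
          exact IH fb lo ((lo + hi) / 2 - 1) (by omega) hlo (by omega)
            (by simp only [List.length_take, List.length_drop]; omega)
        · rw [if_neg h1, if_neg h1]
          by_cases h2 : line > e
          · rw [if_pos h2, if_pos h2]
            have hlist : ((ranges.drop lo.toNat).take (hi + 1 - lo).toNat).drop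
                ((((ranges.drop lo.toNat).take (hi + 1 - lo).toNat).length - 1) / 2 + 1)
                = (ranges.drop ((lo + hi) / 2 + 1).toNat).take
                    (hi + 1 - ((lo + hi) / 2 + 1)).toNat := by
              rw [List.drop_take, List.drop_drop, hidx]
              congr 1
              · omega
              · congr 1
                omega
            rw [hlist]
            exact IH fb ((lo + hi) / 2 + 1) hi (by omega) (by omega) hhi
              (by simp only [List.length_take, List.length_drop]; omega)
          · rw [if_neg h2, if_neg h2]
    · rw [findA_go, if_neg h, searchB_nil line _ _ (by rw [hN]; omega)]

theorem main_eq (ranges : List (Int × Int)) (line : Int) :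
    find_enclosing_code_block ranges line = find_enclosing_code_block_alt ranges line := by
  unfold find_enclosing_code_block find_enclosing_code_block_alt
  by_cases h : ranges = []
  · subst h; rw [if_pos rfl]; rfl
  · rw [if_neg h]
    have hlen : 0 < ranges.length := List.length_pos_iff.mpr h
    have hgo := go_eq ranges line ranges.length ranges.length 0 ((ranges.length : Int) - 1)
      (by omega) (by omega) (by omega)
      (by simp only [List.length_take, List.length_drop]; omega)
    rw [hgo]
    have hc : (((ranges.length : Int) - 1) + 1 - 0).toNat = ranges.length := by omega
    rw [hc, show (0 : Int).toNat = 0 from rfl, List.drop_zero, List.take_length]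

-- ===== VERDICT (by name: the statement is the Claim_ definition above) =====
theorem find_enclosing_code_block_spec : Claim_equal_find_enclosing_code_block := by
  intro ranges line _
  unfold Spec_find_enclosing_code_block
  exact main_eq ranges line
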